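-- pv_equiv track=rewrite | github.com/git874997967/LeetCode_Python | easy/test.py | reverseStr2
-- ===== SOURCE A (Python) =====
-- def reverseStr2(s, k):
--     i, length, final = 0, len(s), ""
--     for i in range(0,length, 2 *k):
--         if k < abs(length - i) < 2 * k :
--             final += s[i:i + k ][::-1] + s[i + k:length]
--         elif abs(length - i) < k:
--             final += s[i: length][::-1]
--         else:
--             final += s[i:i + k][::-1] + s[i+k:i + 2 * k]
--
--     return final
-- ===== SOURCE B (Python) =====
-- def reverseStr2(s, k):
--     n = len(s)
--     def src(j):
--         b = j - j % (2 * k)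
--         m = min(k, n - b)
--         r = j - b
--         return b + m - 1 - r if r < m else j
--     return ''.join(s[src(j)] for j in range(n))
-- ===== Notes on version B (the rewrite author's own statement) =====
-- stated objective: alternative
-- what changed: B computes the result as a closed-form index permutation: for each output position j it arithmetically derives the source position within j's 2k-block (prefix positions map to their mirror, the rest map to themselves) and joins s[src(j)] over range(n), performing no slicing, no reversal and no branching on block length.
-- outside the precondition, e.g. on reverseStr2('ab', 0): A raises ValueError, B raises ZeroDivisionError; on reverseStr2('ab', -1): A returns '', B returns 'ab'
import Mathlib
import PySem

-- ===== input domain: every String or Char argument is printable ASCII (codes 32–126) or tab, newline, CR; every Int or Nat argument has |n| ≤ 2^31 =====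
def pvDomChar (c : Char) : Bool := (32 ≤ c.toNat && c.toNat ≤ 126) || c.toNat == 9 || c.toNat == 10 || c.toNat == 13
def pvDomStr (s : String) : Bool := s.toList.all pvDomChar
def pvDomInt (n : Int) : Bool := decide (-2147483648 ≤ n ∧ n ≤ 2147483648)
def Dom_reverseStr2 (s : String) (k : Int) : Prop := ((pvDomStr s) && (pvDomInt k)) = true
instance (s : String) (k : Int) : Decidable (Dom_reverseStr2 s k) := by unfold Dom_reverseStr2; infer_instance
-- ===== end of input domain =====

-- B replaces A's block-slicing loop by a closed-form index permutation: each output position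
-- computes its source position arithmetically, no reversal or slicing is performed (same O(n) cost).

-- ===== PORT A =====
-- literal transliteration; the string accumulator is carried as List Char, s[x:y][::-1] is
-- (slice …).reverse
def reverseStr2 (s : String) (k : Int) : String :=
  let length : Int := PySem.Str.len s
  let cs : List Char := s.toList
  let final : List Char :=
    (PySem.List.pyRange 0 length (2 * k)).foldl (fun final i =>
      if k < |length - i| ∧ |length - i| < 2 * k then
        final ++ (PySem.List.slice cs (some i) (some (i + k))).reverse
              ++ PySem.List.slice cs (some (i + k)) (some length)
      else if |length - i| < k then
        final ++ (PySem.List.slice cs (some i) (some length)).reverse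
      else
        final ++ (PySem.List.slice cs (some i) (some (i + k))).reverse
              ++ PySem.List.slice cs (some (i + k)) (some (i + 2 * k))) []
  String.ofList final

-- ===== PORT B =====
-- literal transliteration of Source B; the computed source index is always in range on Pre_
-- (1 ≤ k), so s[src(j)], ported as pyGet? + getD, never takes the default
def reverseStr2_alt (s : String) (k : Int) : String :=
  let n : Int := PySem.Str.len s
  let cs : List Char := s.toList
  let src : Int → Int := fun j =>
    let b := j - PySem.Int.mod j (2 * k)
    let m := min k (n - b)
    let r := j - b
    if r < m then b + m - 1 - r else j
  String.ofList ((PySem.List.pyRange 0 n 1).map (fun j => (PySem.List.pyGet? cs (src j)).getD ' '))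

-- ===== PRECONDITION & SPEC =====
-- Pre_ excludes k = 0, on which A raises ValueError (range step 0), and k < 0, on which the
-- loop body never runs and A's empty-string result is an accident of its "" accumulator
-- (B naturally returns s unchanged or raises IndexError there).
def Pre_reverseStr2 (s : String) (k : Int) : Prop := 1 ≤ k
instance (s : String) (k : Int) : Decidable (Pre_reverseStr2 s k) := by unfold Pre_reverseStr2; infer_instance
def pvWitness_reverseStr2 : String × Int := ("abcdefg", 2)

def Spec_reverseStr2 (s : String) (k : Int) (out : String) : Prop := out = reverseStr2_alt s k
instance (s : String) (k : Int) (out : String) : Decidable (Spec_reverseStr2 s k out) := by unfold Spec_reverseStr2; infer_instance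

-- ===== CLAIM (what is proved, stated in full; the proofs are below) =====
def Claim_equal_reverseStr2 : Prop := ∀ (s : String) (k : Int), Dom_reverseStr2 s k → Pre_reverseStr2 s k → Spec_reverseStr2 s k (reverseStr2 s k)

-- ===== LEMMAS AND PROOFS =====

-- the common specification: reverse the first kn chars of each 2kn-block
def pvBlocks (f : Nat) (kn : Nat) (cs : List Char) : List Char :=
  match f with
  | 0 => []
  | f + 1 =>
    if cs = [] then []
    else (cs.take kn).reverse ++ (cs.drop kn).take kn ++ pvBlocks f kn (cs.drop (2 * kn))

theorem pvRange_pos_nil (a b s : Int) (hs : 0 < s) (h : b ≤ a) :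
    PySem.List.pyRange a b s = [] := by
  rw [PySem.List.pyRange_of_pos a b hs]
  simp [show ¬ a < b by omega]

theorem pvRange_pos_cons (a b s : Int) (hs : 0 < s) (h : a < b) :
    PySem.List.pyRange a b s = a :: PySem.List.pyRange (a + s) b s := by
  rw [PySem.List.pyRange_of_pos a b hs, PySem.List.pyRange_of_pos (a + s) b hs]
  by_cases h2 : a + s < b
  · have hdiv : (b - a + s - 1) / s = (b - (a + s) + s - 1) / s + 1 := by
      have := Int.add_mul_ediv_right (b - a - 1) 1 hs.ne'
      have e : b - a + s - 1 = b - a - 1 + 1 * s := by ring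
      rw [e, this]
      congr 1
      ring_nf
    have ht : ((b - a + s - 1) / s).toNat = ((b - (a + s) + s - 1) / s).toNat + 1 := by
      have h1 : 0 ≤ (b - (a + s) + s - 1) / s := by
        apply Int.ediv_nonneg <;> omega
      omega
    simp only [if_pos h, if_pos h2, ht, List.range_succ_eq_map, List.map_cons, List.map_map]
    refine List.cons_eq_cons.mpr ⟨by ring_nf, ?_⟩
    apply List.map_congr_left
    intro x _
    simp [Nat.succ_eq_add_one]
    ring
  · have hcount : (b - a + s - 1) / s = 1 := by
      have e : b - a + s - 1 = b - a - 1 + 1 * s := by ring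
      rw [e, Int.add_mul_ediv_right _ _ hs.ne', Int.ediv_eq_zero_of_lt (by omega) (by omega)]
      omega
    simp [if_pos h, show ¬ a + s < b by omega, hcount, List.range_succ]

-- A's three branches all compute the uniform block step
theorem pvBranchCollapse (cs : List Char) (k i : Int) (hk : 1 ≤ k) (hi : 0 ≤ i)
    (hlt : i < (cs.length : Int)) (acc : List Char) :
    (if k < |(cs.length : Int) - i| ∧ |(cs.length : Int) - i| < 2 * k then
        acc ++ (PySem.List.slice cs (some i) (some (i + k))).reverse
            ++ PySem.List.slice cs (some (i + k)) (some (cs.length : Int))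
      else if |(cs.length : Int) - i| < k then
        acc ++ (PySem.List.slice cs (some i) (some (cs.length : Int))).reverse
      else
        acc ++ (PySem.List.slice cs (some i) (some (i + k))).reverse
            ++ PySem.List.slice cs (some (i + k)) (some (i + 2 * k)))
    = acc ++ ((cs.drop i.toNat).take k.toNat).reverse
          ++ ((cs.drop i.toNat).drop k.toNat).take k.toNat := by
  have hn : (0:Int) ≤ (cs.length : Int) := by positivity
  rw [PySem.List.slice_toNat cs hi (by omega), PySem.List.slice_toNat cs (by omega) hn,
      PySem.List.slice_toNat cs hi hn, PySem.List.slice_toNat cs (by omega) (by omega)]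
  have habs : |(cs.length : Int) - i| = (cs.length : Int) - i := abs_of_pos (by omega)
  have h1 : (i + k).toNat = i.toNat + k.toNat := by omega
  have h2 : (i + 2 * k).toNat = i.toNat + 2 * k.toNat := by omega
  have hdd : ∀ m : Nat, cs.drop (i.toNat + m) = (cs.drop i.toNat).drop m := by
    intro m; rw [List.drop_drop]
  have hlen : (cs.drop i.toNat).length = cs.length - i.toNat := by simp
  rw [habs, h1, h2, hdd]
  simp only [Int.toNat_natCast]
  have hdlen : ((cs.drop i.toNat).drop k.toNat).length = cs.length - i.toNat - k.toNat := by
    simp; try omega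
  have e1 : i.toNat + k.toNat - i.toNat = k.toNat := by omega
  split_ifs with hc1 hc2
  · have ha : ((cs.drop i.toNat).drop k.toNat).take (cs.length - (i.toNat + k.toNat))
        = (cs.drop i.toNat).drop k.toNat := List.take_of_length_le (by omega)
    have hb : ((cs.drop i.toNat).drop k.toNat).take k.toNat
        = (cs.drop i.toNat).drop k.toNat := List.take_of_length_le (by omega)
    rw [e1, ha, hb]
  · have ha : (cs.drop i.toNat).take (cs.length - i.toNat) = cs.drop i.toNat :=
      List.take_of_length_le (le_of_eq hlen)
    have hb : (cs.drop i.toNat).take k.toNat = cs.drop i.toNat :=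
      List.take_of_length_le (by omega)
    have hcnil : (cs.drop i.toNat).drop k.toNat = [] := List.drop_eq_nil_of_le (by omega)
    rw [ha, hb, hcnil, List.take_nil, List.append_nil]
  · have e3 : i.toNat + 2 * k.toNat - (i.toNat + k.toNat) = k.toNat := by omega
    rw [e1, e3]

-- A's loop computes pvBlocks of the remaining suffix
theorem pvLoopA (cs : List Char) (k : Int) (hk : 1 ≤ k) :
    ∀ (f : Nat) (i : Int) (acc : List Char), 0 ≤ i → (cs.length : Int) - i ≤ (f : Int) →
    (PySem.List.pyRange i (cs.length : Int) (2 * k)).foldl (fun final j =>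
      if k < |(cs.length : Int) - j| ∧ |(cs.length : Int) - j| < 2 * k then
        final ++ (PySem.List.slice cs (some j) (some (j + k))).reverse
              ++ PySem.List.slice cs (some (j + k)) (some (cs.length : Int))
      else if |(cs.length : Int) - j| < k then
        final ++ (PySem.List.slice cs (some j) (some (cs.length : Int))).reverse
      else
        final ++ (PySem.List.slice cs (some j) (some (j + k))).reverse
              ++ PySem.List.slice cs (some (j + k)) (some (j + 2 * k))) acc
    = acc ++ pvBlocks f k.toNat (cs.drop i.toNat) := by
  intro f
  induction f with
  | zero =>
    intro i acc hi hf
    rw [pvRange_pos_nil _ _ _ (by omega) (by omega)]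
    simp [pvBlocks]
  | succ f ih =>
    intro i acc hi hf
    by_cases hlt : i < (cs.length : Int)
    · rw [pvRange_pos_cons _ _ _ (by omega) hlt]
      simp only [List.foldl_cons]
      rw [pvBranchCollapse cs k i hk hi hlt acc]
      rw [ih (i + 2 * k) _ (by omega) (by omega)]
      have hne : cs.drop i.toNat ≠ [] := by
        simp only [ne_eq, List.drop_eq_nil_iff]; omega
      have e : (i + 2 * k).toNat = i.toNat + 2 * k.toNat := by omega
      rw [e]
      simp only [pvBlocks, if_neg hne]
      simp [List.drop_drop, List.append_assoc]
    · rw [pvRange_pos_nil _ _ _ (by omega) (by omega)]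
      have h0 : cs.drop i.toNat = [] := List.drop_eq_nil_of_le (by omega)
      simp [h0, pvBlocks]

-- the Nat-level source-index permutation underlying B
def pvSrc (n kn j : Nat) : Nat :=
  if j % (2 * kn) < min kn (n - (j - j % (2 * kn))) then
    (j - j % (2 * kn)) + min kn (n - (j - j % (2 * kn))) - 1 - j % (2 * kn)
  else j

-- inside the first block the permutation is a plain prefix reversal
theorem pvSrc_head (n kn j : Nat) (hj : j < 2 * kn) :
    pvSrc n kn j = if j < min kn n then min kn n - 1 - j else j := by
  unfold pvSrc
  rw [Nat.mod_eq_of_lt hj]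
  simp

-- the permutation is self-similar under a 2kn shift
theorem pvSrc_shift (n kn j : Nat) (h2 : 2 * kn ≤ n) :
    pvSrc n kn (2 * kn + j) = 2 * kn + pvSrc (n - 2 * kn) kn j := by
  unfold pvSrc
  rw [Nat.add_mod_left]
  have hmb : j % (2 * kn) ≤ j := Nat.mod_le _ _
  have e2 : n - (2 * kn + j - j % (2 * kn)) = n - 2 * kn - (j - j % (2 * kn)) := by omega
  rw [e2]
  split_ifs with h
  · omega
  · rfl

-- the head of one block as an index map
theorem pvHead_map (cs : List Char) (kn : Nat) :
    (cs.take kn).reverse ++ (cs.drop kn).take kn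
      = (List.range (min (2 * kn) cs.length)).map
          (fun j => cs.getD (if j < min kn cs.length then min kn cs.length - 1 - j else j) ' ') := by
  apply List.ext_getElem
  · simp; omega
  · intro j h1 h2
    have hjlt : j < min (2 * kn) cs.length := by
      simpa using h2
    rw [List.getElem_map, List.getElem_range]
    by_cases hj : j < min kn cs.length
    · rw [if_pos hj, List.getElem_append_left (by simp; omega)]
      rw [List.getElem_reverse, List.getElem_take]
      rw [List.getD_eq_getElem cs ' ' (by omega)]
      congr 1
      simp
      try omega
    · rw [List.getElem_append_right (by simp; omega)]
      rw [List.getElem_take, List.getElem_drop]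
      rw [if_neg hj]
      rw [List.getD_eq_getElem cs ' ' (by omega)]
      congr 1
      simp
      try omega

-- pvBlocks is the index permutation applied positionwise
theorem pvBlocks_eq_map (kn : Nat) (hk : 1 ≤ kn) :
    ∀ (f : Nat) (cs : List Char), cs.length ≤ f →
    pvBlocks f kn cs
      = (List.range cs.length).map (fun j => cs.getD (pvSrc cs.length kn j) ' ') := by
  intro f
  induction f with
  | zero =>
    intro cs hf
    have : cs = [] := List.eq_nil_of_length_eq_zero (by omega)
    simp [this, pvBlocks]
  | succ f ih =>
    intro cs hf
    by_cases hnil : cs = []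
    · simp [hnil, pvBlocks]
    · have hn1 : 1 ≤ cs.length := List.length_pos_iff.mpr hnil
      simp only [pvBlocks, if_neg hnil]
      set n := cs.length with hn
      have hL : min (2 * kn) n ≤ n := by omega
      have hsplit : List.range n
          = List.range (min (2 * kn) n)
            ++ (List.range (n - min (2 * kn) n)).map (fun x => min (2 * kn) n + x) := by
        rw [← List.range_add]; congr 1; omega
      conv_rhs => rw [hsplit, List.map_append, List.map_map]
      rw [pvHead_map cs kn]
      congr 1
      · apply List.map_congr_left
        intro j hj
        rw [List.mem_range] at hj
        rw [pvSrc_head n kn j (by omega)]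
      · by_cases hbig : 2 * kn ≤ n
        · have hLe : min (2 * kn) n = 2 * kn := by omega
          have hdl : (cs.drop (2 * kn)).length = n - 2 * kn := by simp [hn]
          rw [ih (cs.drop (2 * kn)) (by omega), hdl, hLe]
          apply List.map_congr_left
          intro j hj
          rw [List.mem_range] at hj
          simp only [Function.comp]
          rw [pvSrc_shift n kn j hbig]
          have hsb : pvSrc (n - 2 * kn) kn j < n - 2 * kn := by
            unfold pvSrc
            have := Nat.mod_le j (2 * kn)
            have hmod : j % (2 * kn) ≤ j := this
            split_ifs with h
            · omega
            · omega
          rw [List.getD_eq_getElem cs ' ' (by omega),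
              List.getD_eq_getElem _ ' ' (by omega)]
          rw [List.getElem_drop]
        · have hLe : min (2 * kn) n = n := by omega
          have hdrop : cs.drop (2 * kn) = [] := List.drop_eq_nil_of_le (by omega)
          rw [hLe, hdrop]
          cases f <;> simp [pvBlocks]

-- B's Int-level map is the Nat-level permutation map
theorem pvLoopB (cs : List Char) (k : Int) (hk : 1 ≤ k) :
    (PySem.List.pyRange 0 (cs.length : Int) 1).map (fun j =>
      (PySem.List.pyGet? cs
        (let b := j - PySem.Int.mod j (2 * k)
         let m := min k ((cs.length : Int) - b)
         let r := j - b
         if r < m then b + m - 1 - r else j)).getD ' ')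
    = (List.range cs.length).map (fun j => cs.getD (pvSrc cs.length k.toNat j) ' ') := by
  rw [PySem.List.pyRange_one, List.map_map]
  have e0 : ((cs.length : Int) - 0).toNat = cs.length := by omega
  rw [e0]
  apply List.map_congr_left
  intro j hj
  rw [List.mem_range] at hj
  have hK : (2 * k) = ((2 * k.toNat : Nat) : Int) := by omega
  simp only [Function.comp, zero_add, hK, PySem.Int.mod_natCast]
  have hmle : j % (2 * k.toNat) ≤ j := Nat.mod_le _ _
  have hidx : (let b := (j : Int) - ((j % (2 * k.toNat) : Nat) : Int)
               let m := min k ((cs.length : Int) - b)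
               let r := (j : Int) - b
               if r < m then b + m - 1 - r else (j : Int))
      = ((pvSrc cs.length k.toNat j : Nat) : Int) := by
    simp only [pvSrc]
    have hb : (j : Int) - ((j % (2 * k.toNat) : Nat) : Int)
        = ((j - j % (2 * k.toNat) : Nat) : Int) := by omega
    have hm : min k ((cs.length : Int) - ((j - j % (2 * k.toNat) : Nat) : Int))
        = ((min k.toNat (cs.length - (j - j % (2 * k.toNat))) : Nat) : Int) := by omega
    rw [hb, hm]
    split_ifs <;> omega
  rw [hidx, PySem.List.pyGet?_natCast]
  have hs : pvSrc cs.length k.toNat j < cs.length := by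
    simp only [pvSrc]
    split_ifs with h <;> omega
  rw [List.getElem?_eq_getElem hs, List.getD_eq_getElem cs ' ' hs]
  rfl

-- ===== VERDICT (by name: the statement is the Claim_ definition above) =====
theorem reverseStr2_spec : Claim_equal_reverseStr2 := by
  intro s k _ hk
  have hk1 : 1 ≤ k := hk
  unfold Spec_reverseStr2 reverseStr2 reverseStr2_alt
  simp only [PySem.Str.len_eq]
  rw [pvLoopA s.toList k hk1 s.toList.length 0 [] le_rfl (by simp),
      pvLoopB s.toList k hk1,
      ← pvBlocks_eq_map k.toNat (by omega) s.toList.length s.toList le_rfl]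
  simp
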